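-- pv_equiv track=rewrite | github.com/uglyboxer/challenge_submissions | pin_challenge_cole.py | foo
-- ===== SOURCE A (Python) =====
-- CONSONANTS = "bcdfghjklmnpqrstvwyz"
--
-- VOWELS = "aeiou"
--
-- def split_to_double_digits(num):
--     """Takes a number and splits into a list of double (or less) digits
--     Returns a list of the double digits"""
--     num_list = []
--     while num >= 1:
--         num_list.append(num%100)
--         num //= 100
--     num_list.reverse()
--     return num_list
--
-- def convert_to_letters(num):
--     """Takes in a num of two digits
--     Convert that to letters
--     """
--     letter_list = [CONSONANTS[num//5], VOWELS[num%5]]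
--     return "".join(letter_list)
--
-- def split_to_pairs(str1):
--     """Take in a string of indeterminate length and split it into a list of
--     pairs of letters.
--     Return list of pairs (each pair a list)
--     """
--     lst = list(str1)
--     return [[lst[x], lst[x+1]] for x in range(0, len(lst)-1, 2)]
--
-- def convert_to_numbers(str_list):
--     """Take in a list of 2 Alphabetic chars and
--     convert them to numbers
--     Returns two digits as string
--     """
--     return str(CONSONANTS.index(str_list[0])*5 + VOWELS.index(str_list[1]))
--
-- def foo(pincode):
--     """Create a list of doubledigits or alpha chars from pincode
--     and swap in the appropriate direction.
--     """
--     try: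
--         pincode = int(pincode)
--         ans_lst = [convert_to_letters(x) for x in
--                     split_to_double_digits(pincode)]
--     except ValueError:
--         pincode = str(pincode)
--         ans_lst = [convert_to_numbers(x) for x in split_to_pairs(pincode)]
--     except TypeError:
--         return None
--     answer = "".join(ans_lst)
--     return answer
-- ===== SOURCE B (Python) =====
-- CONSONANTS = "bcdfghjklmnpqrstvwyz"
--
-- VOWELS = "aeiou"
--
--
-- def foo(pincode):
--     """Swap pincode between digits and letter pairs, in one pass each way:
--     digits are encoded back-to-front two decimal digits at a time, letters
--     are decoded by consuming the string two characters at a time."""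
--     try:
--         n = int(pincode)
--     except ValueError:
--         cs = str(pincode)
--         out = []
--         while len(cs) >= 2:
--             out.append(str(CONSONANTS.index(cs[0]) * 5 + VOWELS.index(cs[1])))
--             cs = cs[2:]
--         return "".join(out)
--     except TypeError:
--         return None
--     res = ""
--     while n >= 1:
--         res = CONSONANTS[(n % 100) // 5] + VOWELS[n % 5] + res
--         n //= 100
--     return res
-- ===== Notes on version B (the rewrite author's own statement) =====
-- stated objective: simpler
-- what changed: Replaces A's four helper functions and its build-list/reverse/map/join pipeline with two direct single-pass loops: encoding prepends each two-digit group's letter pair to the result string while dividing by 100 (no intermediate list, no reverse, no join), and decoding consumes the string two characters at a time instead of indexing pairs out of it via a range() comprehension.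
import Mathlib
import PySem

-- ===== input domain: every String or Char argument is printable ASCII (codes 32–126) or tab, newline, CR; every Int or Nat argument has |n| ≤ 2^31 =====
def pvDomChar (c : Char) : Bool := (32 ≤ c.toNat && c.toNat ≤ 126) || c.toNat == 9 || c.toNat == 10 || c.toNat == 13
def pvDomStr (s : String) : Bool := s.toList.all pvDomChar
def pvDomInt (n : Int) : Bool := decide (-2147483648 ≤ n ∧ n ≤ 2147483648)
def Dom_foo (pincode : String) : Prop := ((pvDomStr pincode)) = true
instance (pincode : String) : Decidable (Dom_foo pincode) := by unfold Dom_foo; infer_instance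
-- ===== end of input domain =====

-- B replaces A's helper-pipeline (build group list, reverse, map, join / pair-comprehension
-- over range()) with two direct single-pass loops; objective: simpler, same cost.

-- ===== PORT A =====
def pvConsonants : List Char := "bcdfghjklmnpqrstvwyz".toList

def pvVowels : List Char := "aeiou".toList

-- the while loop of split_to_double_digits, state = (num, num_list)
def splitToDoubleDigitsGo (num : Int) (numList : List Int) : List Int :=
  if _h : 1 ≤ num then
    splitToDoubleDigitsGo (PySem.Int.floordiv num 100) (numList ++ [PySem.Int.mod num 100])
  else numList
termination_by num.toNat
decreasing_by
  have h2 : PySem.Int.floordiv num 100 = num / 100 := PySem.Int.floordiv_eq_ediv_of_pos (by norm_num)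
  omega

def splitToDoubleDigits (num : Int) : List Int :=
  (splitToDoubleDigitsGo num []).reverse

def convertToLetters (num : Int) : Option (List Char) := do
  let c ← PySem.List.pyGet? pvConsonants (PySem.Int.floordiv num 5)
  let v ← PySem.List.pyGet? pvVowels (PySem.Int.mod num 5)
  pure [c, v]   -- "".join(letter_list)

-- a list comprehension whose body may raise (IndexError / ValueError → none)
def optMap {α β : Type} (f : α → Option β) : List α → Option (List β)
  | [] => some []
  | x :: xs => do
      let y ← f x
      let ys ← optMap f xs
      pure (y :: ys)

def splitToPairs (cs : List Char) : Option (List (List Char)) :=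
  optMap (fun x => do
      let a ← PySem.List.pyGet? cs x
      let b ← PySem.List.pyGet? cs (x + 1)
      pure [a, b])
    (PySem.List.pyRange 0 ((cs.length : Int) - 1) 2)

def convertToNumbers (strList : List Char) : Option (List Char) := do
  let a ← PySem.List.pyGet? strList 0
  let b ← PySem.List.pyGet? strList 1
  let i ← PySem.List.index? pvConsonants a   -- str.index: ValueError → none
  let j ← PySem.List.index? pvVowels b
  pure (PySem.Int.toChars ((i : Int) * 5 + (j : Int)))

def foo (pincode : String) : Option String :=
  match PySem.Int.ofStr? pincode with
  | some n =>   -- int(pincode) succeeded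
      (optMap convertToLetters (splitToDoubleDigits n)).map
        (fun ansLst => String.mk (PySem.Chars.join [] ansLst))
  | none =>     -- ValueError → letters branch (TypeError is impossible for a str argument)
      ((splitToPairs pincode.toList).bind (optMap convertToNumbers)).map
        (fun ansLst => String.mk (PySem.Chars.join [] ansLst))

-- ===== PORT B =====
-- while n >= 1: res = CONSONANTS[(n % 100) // 5] + VOWELS[n % 5] + res; n //= 100
def fooEncGo (n : Int) (res : List Char) : Option (List Char) :=
  if _h : 1 ≤ n then do
    let c ← PySem.List.pyGet? pvConsonants (PySem.Int.floordiv (PySem.Int.mod n 100) 5)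
    let v ← PySem.List.pyGet? pvVowels (PySem.Int.mod n 5)
    fooEncGo (PySem.Int.floordiv n 100) (c :: v :: res)
  else some res
termination_by n.toNat
decreasing_by
  have h2 : PySem.Int.floordiv n 100 = n / 100 := PySem.Int.floordiv_eq_ediv_of_pos (by norm_num)
  omega

-- while len(cs) >= 2: out.append(str(C.index(cs[0])*5 + V.index(cs[1]))); cs = cs[2:]
-- (the pieces are emitted in order, i.e. concatenated as "".join does)
def fooDecGo : List Char → Option (List Char)
  | a :: b :: rest => do
      let i ← PySem.List.index? pvConsonants a
      let j ← PySem.List.index? pvVowels b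
      let out ← fooDecGo rest
      pure (PySem.Int.toChars ((i : Int) * 5 + (j : Int)) ++ out)
  | _ => some []

def foo_alt (pincode : String) : Option String :=
  match PySem.Int.ofStr? pincode with
  | some n => (fooEncGo n []).map String.mk
  | none => (fooDecGo pincode.toList).map String.mk

-- ===== PRECONDITION & SPEC =====
-- Pre_ excludes exactly the inputs where A raises an uncaught ValueError: non-int-like
-- strings in which some processed pair has a character outside CONSONANTS/VOWELS.
def Pre_foo (pincode : String) : Prop :=
  (PySem.Int.ofStr? pincode).isSome = true ∨
  ∀ i < pincode.toList.length / 2,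
    pincode.toList.getD (2 * i) ' ' ∈ pvConsonants ∧
    pincode.toList.getD (2 * i + 1) ' ' ∈ pvVowels
instance (pincode : String) : Decidable (Pre_foo pincode) := by unfold Pre_foo; infer_instance

def pvWitness_foo : String := "1234"

def Spec_foo (pincode : String) (out : Option String) : Prop := out = foo_alt pincode
instance (pincode : String) (out : Option String) : Decidable (Spec_foo pincode out) := by unfold Spec_foo; infer_instance

-- ===== CLAIM (what is proved, stated in full; the proofs are below) =====
def Claim_equal_foo : Prop := ∀ (pincode : String), Dom_foo pincode → Pre_foo pincode → Spec_foo pincode (foo pincode)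

-- ===== LEMMAS AND PROOFS =====

lemma join_nil_flatten (l : List (List Char)) : PySem.Chars.join [] l = l.flatten := by
  induction l with
  | nil => rfl
  | cons p rest ih =>
    cases rest with
    | nil => simp [PySem.Chars.join, List.intercalate]
    | cons q r => rw [PySem.Chars.join_cons_cons]; simp_all

lemma mod_mod_100_5 (n : Int) :
    PySem.Int.mod (PySem.Int.mod n 100) 5 = PySem.Int.mod n 5 := by
  rw [PySem.Int.mod_eq_emod_of_pos (by norm_num), PySem.Int.mod_eq_emod_of_pos (by norm_num),
    PySem.Int.mod_eq_emod_of_pos (by norm_num)]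
  exact Int.emod_emod_of_dvd n (by norm_num)

lemma splitGo_acc (n : Int) (acc : List Int) :
    splitToDoubleDigitsGo n acc = acc ++ splitToDoubleDigitsGo n [] := by
  by_cases h : 1 ≤ n
  · conv_lhs => rw [splitToDoubleDigitsGo]
    conv_rhs => rw [splitToDoubleDigitsGo]
    rw [dif_pos h, dif_pos h,
      splitGo_acc (PySem.Int.floordiv n 100) (acc ++ [PySem.Int.mod n 100]),
      splitGo_acc (PySem.Int.floordiv n 100) ([] ++ [PySem.Int.mod n 100])]
    simp
  · conv_lhs => rw [splitToDoubleDigitsGo]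
    conv_rhs => rw [splitToDoubleDigitsGo]
    rw [dif_neg h, dif_neg h]; simp
termination_by n.toNat
decreasing_by
  all_goals
    have h2 : PySem.Int.floordiv n 100 = n / 100 := PySem.Int.floordiv_eq_ediv_of_pos (by norm_num)
    omega

lemma splitDD_step (n : Int) (h : 1 ≤ n) :
    splitToDoubleDigits n =
      splitToDoubleDigits (PySem.Int.floordiv n 100) ++ [PySem.Int.mod n 100] := by
  unfold splitToDoubleDigits
  conv_lhs => rw [splitToDoubleDigitsGo]
  rw [dif_pos h, splitGo_acc]
  simp

lemma splitDD_base (n : Int) (h : ¬ 1 ≤ n) : splitToDoubleDigits n = [] := by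
  unfold splitToDoubleDigits
  conv_lhs => rw [splitToDoubleDigitsGo]
  rw [dif_neg h]
  rfl

lemma optMap_append {α β : Type} (f : α → Option β) (xs : List α) (x : α) :
    optMap f (xs ++ [x]) =
      (optMap f xs).bind (fun ys => (f x).map (fun y => ys ++ [y])) := by
  induction xs with
  | nil => simp only [List.nil_append, optMap]; cases f x <;> rfl
  | cons a as ih =>
    simp only [List.cons_append, optMap, ih]
    cases f a <;> cases optMap f as <;> cases f x <;> rfl

lemma optMap_congr {α β : Type} {f g : α → Option β} {l : List α}
    (h : ∀ x ∈ l, f x = g x) : optMap f l = optMap g l := by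
  induction l with
  | nil => rfl
  | cons a as ih => simp only [optMap, h a (by simp), ih (fun x hx => h x (by simp [hx]))]

lemma optMap_map {α β γ : Type} (f : β → Option γ) (g : α → β) (l : List α) :
    optMap f (l.map g) = optMap (fun x => f (g x)) l := by
  induction l with
  | nil => rfl
  | cons a as ih => simp only [List.map_cons, optMap, ih]

lemma convL_unfold (n : Int) :
    convertToLetters (PySem.Int.mod n 100) =
      (PySem.List.pyGet? pvConsonants (PySem.Int.floordiv (PySem.Int.mod n 100) 5)).bind
        (fun c => (PySem.List.pyGet? pvVowels (PySem.Int.mod n 5)).bind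
          (fun v => some [c, v])) := by
  unfold convertToLetters
  rw [mod_mod_100_5]
  rfl

lemma enc_eq (n : Int) (res : List Char) :
    fooEncGo n res =
      (optMap convertToLetters (splitToDoubleDigits n)).map
        (fun l => PySem.Chars.join [] l ++ res) := by
  by_cases h : 1 ≤ n
  · conv_lhs => rw [fooEncGo]
    rw [dif_pos h, splitDD_step n h, optMap_append, convL_unfold n]
    cases hc : PySem.List.pyGet? pvConsonants
        (PySem.Int.floordiv (PySem.Int.mod n 100) 5) with
    | none =>
      cases optMap convertToLetters (splitToDoubleDigits (PySem.Int.floordiv n 100)) <;> rfl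
    | some c =>
      cases hv : PySem.List.pyGet? pvVowels (PySem.Int.mod n 5) with
      | none =>
        cases optMap convertToLetters (splitToDoubleDigits (PySem.Int.floordiv n 100)) <;> rfl
      | some v =>
        simp only [Option.bind_eq_bind, Option.bind_some]
        rw [enc_eq (PySem.Int.floordiv n 100) (c :: v :: res)]
        cases optMap convertToLetters (splitToDoubleDigits (PySem.Int.floordiv n 100)) with
        | none => rfl
        | some ys =>
          simp [join_nil_flatten]
  · conv_lhs => rw [fooEncGo]
    rw [dif_neg h, splitDD_base n h]
    simp [optMap, PySem.Chars.join_nil]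
termination_by n.toNat
decreasing_by
  have h2 : PySem.Int.floordiv n 100 = n / 100 := PySem.Int.floordiv_eq_ediv_of_pos (by norm_num)
  omega

lemma range2_shift (m : Nat) :
    PySem.List.pyRange 0 ((m : Int) + 1) 2 =
      0 :: (PySem.List.pyRange 0 ((m : Int) - 1) 2).map (· + 2) := by
  rw [PySem.List.pyRange_of_pos _ _ (by norm_num : (0:Int) < 2),
    PySem.List.pyRange_of_pos _ _ (by norm_num : (0:Int) < 2)]
  have h1 : (if (0:Int) < (m:Int) + 1 then ((((m:Int)+1) - 0 + 2 - 1) / 2).toNat else 0)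
      = m / 2 + 1 := by
    rw [if_pos (by omega)]; omega
  have h2 : (if (0:Int) < (m:Int) - 1 then ((((m:Int)-1) - 0 + 2 - 1) / 2).toNat else 0)
      = m / 2 := by
    split_ifs <;> omega
  rw [h1, h2, List.range_succ_eq_map, List.map_cons, List.map_map]
  congr 1
  rw [List.map_map]
  refine List.map_congr_left ?_
  intro k _
  simp only [Function.comp]
  push_cast
  ring

lemma index?_of_mem {l : List Char} {a : Char} (h : a ∈ l) :
    ∃ i, PySem.List.index? l a = some i := by
  rw [← Option.ne_none_iff_exists']
  simp [PySem.List.index?, List.idxOf?_eq_none_iff, h]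

lemma pairs_shift (a b : Char) (rest : List Char) :
    splitToPairs (a :: b :: rest) =
      (splitToPairs rest).bind (fun ps => some ([a, b] :: ps)) := by
  have hlen : (((a :: b :: rest).length : Int)) - 1 = (rest.length : Int) + 1 := by
    simp only [List.length_cons]; push_cast; ring
  have hget0 : PySem.List.pyGet? (a :: b :: rest) 0 = some a := by
    rw [show (0 : Int) = ((0 : Nat) : Int) from rfl, PySem.List.pyGet?_natCast]; rfl
  have hget1 : PySem.List.pyGet? (a :: b :: rest) (0 + 1) = some b := by
    rw [show ((0 : Int) + 1) = ((1 : Nat) : Int) from rfl, PySem.List.pyGet?_natCast]; rfl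
  have hmapshift :
      optMap (fun x => do
          let a' ← PySem.List.pyGet? (a :: b :: rest) x
          let b' ← PySem.List.pyGet? (a :: b :: rest) (x + 1)
          pure [a', b'])
        ((PySem.List.pyRange 0 ((rest.length : Int) - 1) 2).map (· + 2)) =
      splitToPairs rest := by
    rw [optMap_map]
    unfold splitToPairs
    refine optMap_congr ?_
    intro x hx
    have hx0 : 0 ≤ x := ((PySem.List.mem_pyRange_iff_of_pos (by norm_num) x).mp hx).1
    obtain ⟨k, rfl⟩ := Int.eq_ofNat_of_zero_le hx0
    have e1 : (k : Int) + 2 = ((k + 2 : Nat) : Int) := by push_cast; ring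
    have e2 : (k : Int) + 2 + 1 = ((k + 3 : Nat) : Int) := by push_cast; ring
    have e3 : (k : Int) + 1 = ((k + 1 : Nat) : Int) := by push_cast; ring
    have e2' : ((k + 2 : Nat) : Int) + 1 = ((k + 3 : Nat) : Int) := by push_cast; ring
    simp only [e1, e2', e3, PySem.List.pyGet?_natCast]
    simp [List.getElem?_cons_succ]
  conv_lhs => rw [splitToPairs]
  rw [hlen, range2_shift rest.length]
  simp only [optMap]
  rw [hget0, hget1, hmapshift] -- the comprehension body applied at x = 0, then shifted
  simp only [Option.pure_def, Option.bind_eq_bind, Option.bind_some]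

lemma dec_eq (cs : List Char)
    (hpre : ∀ i < cs.length / 2,
      cs.getD (2 * i) ' ' ∈ pvConsonants ∧ cs.getD (2 * i + 1) ' ' ∈ pvVowels) :
    ((splitToPairs cs).bind (optMap convertToNumbers)).map
      (fun l => PySem.Chars.join [] l) = fooDecGo cs := by
  match cs with
  | [] => rfl
  | [a] => rfl
  | a :: b :: rest =>
    have hrest : ∀ i < rest.length / 2,
        rest.getD (2 * i) ' ' ∈ pvConsonants ∧ rest.getD (2 * i + 1) ' ' ∈ pvVowels := by
      intro i hi
      have h := hpre (i + 1) (by simp only [List.length_cons]; omega)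
      simpa [List.getD_cons_succ] using h
    have h0 := hpre 0 (by simp only [List.length_cons]; omega)
    have ha : a ∈ pvConsonants := by simpa using h0.1
    have hb : b ∈ pvVowels := by simpa using h0.2
    obtain ⟨i, hia⟩ := index?_of_mem ha
    obtain ⟨j, hjb⟩ := index?_of_mem hb
    have hconvN : convertToNumbers [a, b] = some (PySem.Int.toChars ((i : Int) * 5 + (j : Int))) := by
      unfold convertToNumbers
      rw [show PySem.List.pyGet? [a, b] 0 = some a from rfl,
        show PySem.List.pyGet? [a, b] 1 = some b from rfl]
      simp only [Option.pure_def, Option.bind_eq_bind, Option.bind_some, hia, hjb]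
    have IH := dec_eq rest hrest
    rw [pairs_shift a b rest]
    conv_rhs => rw [fooDecGo]
    rw [hia, hjb]
    simp only [Option.bind_eq_bind, Option.bind_some]
    cases hsp : splitToPairs rest with
    | none =>
      rw [hsp] at IH
      simp only [Option.bind_none, Option.map_none] at IH ⊢
      rw [← IH]
      rfl
    | some ps =>
      rw [hsp] at IH
      simp only [Option.bind_some] at IH
      rw [← IH]
      simp only [optMap, hconvN, Option.pure_def, Option.bind_eq_bind, Option.bind_some]
      cases hx : optMap convertToNumbers ps with
      | none => rfl
      | some xs => simp [join_nil_flatten]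

-- ===== VERDICT (by name: the statement is the Claim_ definition above) =====
theorem foo_spec : Claim_equal_foo := by
  intro pincode _hdom hpre
  unfold Spec_foo foo foo_alt
  cases h : PySem.Int.ofStr? pincode with
  | some n =>
    dsimp only
    rw [enc_eq n []]
    cases optMap convertToLetters (splitToDoubleDigits n) <;> simp
  | none =>
    dsimp only
    have hp : ∀ i < pincode.toList.length / 2,
        pincode.toList.getD (2 * i) ' ' ∈ pvConsonants ∧
        pincode.toList.getD (2 * i + 1) ' ' ∈ pvVowels := by
      rcases hpre with hpre | hpre
      · rw [h] at hpre; simp at hpre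
      · exact hpre
    rw [← dec_eq pincode.toList hp]
    cases (splitToPairs pincode.toList).bind (optMap convertToNumbers) <;> simp
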